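-- pv_equiv track=rewrite | github.com/innerNULL/PLM-ICD-multi-label-classifier | src/plm_icd_multi_label_classifier/text.py | token_ids_chunking
-- ===== SOURCE A (Python) =====
-- from typing import Tuple, List
--
-- def token_ids_chunking(
--     text_ids: List[int], attn_marks: List[int],
--     chunk_size: int, chunk_num: int, padding_idx: int, check: bool=True
-- ) -> Tuple[ List[List[int]], List[List[int]] ]:
--     if check:
--         assert(len(text_ids) == len(attn_marks))
--
--     total_token_num: int = chunk_num * chunk_size
--     text_ids = text_ids + [padding_idx] * (total_token_num - len(text_ids))
--     attn_marks = attn_marks + [0] * (total_token_num - len(attn_marks))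
--
--     if check:
--         assert(len(text_ids) == len(attn_marks))
--
--     token_id_chunks: List[List[int]] = []
--     attn_mark_chunks: List[List[int]] = []
--     for i in range(chunk_num):
--         start_idx: int = i * chunk_size
--         end_idx: int = (i + 1) * chunk_size
--         curr_chunk_token_ids: List[int] = text_ids[start_idx:end_idx]
--         curr_chunk_attn_marks: List[int] = attn_marks[start_idx:end_idx]
--         token_id_chunks.append(curr_chunk_token_ids)
--         attn_mark_chunks.append(curr_chunk_attn_marks)
--
--     return (token_id_chunks, attn_mark_chunks)
-- ===== SOURCE B (Python) =====
-- def token_ids_chunking(text_ids, attn_marks, chunk_size, chunk_num, padding_idx, check=True):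
--     if check:
--         assert(len(text_ids) == len(attn_marks))
--
--     def chunked(xs, filler):
--         # Consume a shrinking remainder: peel the next chunk off the front,
--         # top it up to chunk_size, repeat chunk_num times. No chunk-boundary
--         # index arithmetic and no globally padded copy of the input.
--         out = []
--         rest = xs
--         for _ in range(chunk_num):
--             head, rest = rest[:chunk_size], rest[chunk_size:]
--             out.append(head + [filler] * (chunk_size - len(head)))
--         return out
--
--     return (chunked(text_ids, padding_idx), chunked(attn_marks, 0))
-- ===== Notes on version B (the rewrite author's own statement) =====
-- stated objective: alternative
-- what changed: B replaces A's staged pipeline (pad both lists globally to chunk_num*chunk_size, then cut chunk i at computed boundaries i*chunk_size:(i+1)*chunk_size in one interleaved loop) by a consumption loop: a shared helper, run once per list, peels the head off a shrinking remainder and tops each chunk up locally, so no chunk-boundary arithmetic and no padded global copies are built.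
import Mathlib
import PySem

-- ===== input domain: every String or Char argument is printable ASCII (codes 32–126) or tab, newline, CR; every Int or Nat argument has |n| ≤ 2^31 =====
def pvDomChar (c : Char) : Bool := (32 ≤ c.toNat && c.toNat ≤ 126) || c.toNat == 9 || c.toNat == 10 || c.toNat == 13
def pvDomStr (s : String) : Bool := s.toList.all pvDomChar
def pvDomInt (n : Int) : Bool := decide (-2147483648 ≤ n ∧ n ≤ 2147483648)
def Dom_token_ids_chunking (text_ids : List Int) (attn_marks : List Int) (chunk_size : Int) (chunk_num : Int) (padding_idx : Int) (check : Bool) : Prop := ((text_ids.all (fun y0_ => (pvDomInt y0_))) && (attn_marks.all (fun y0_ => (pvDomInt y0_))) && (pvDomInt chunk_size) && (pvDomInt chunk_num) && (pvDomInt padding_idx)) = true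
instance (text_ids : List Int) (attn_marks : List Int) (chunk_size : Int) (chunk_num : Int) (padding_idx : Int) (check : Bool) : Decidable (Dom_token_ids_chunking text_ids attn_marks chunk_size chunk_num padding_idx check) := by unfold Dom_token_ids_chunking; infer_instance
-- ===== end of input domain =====

-- B replaces A's staged pad-globally-then-index-slice pipeline by a consumption loop (peel head
-- off a shrinking remainder, pad each chunk locally), run once per list via a shared helper.

-- ===== PORT A =====
-- A: pad both lists globally to chunk_num*chunk_size, then slice chunk i as [i*cs:(i+1)*cs]
-- in one loop that appends to both output lists.
-- ([x]*k with k ≤ 0 is []: List.replicate (…).toNat matches Python's list repetition exactly.)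
def token_ids_chunking (text_ids : List Int) (attn_marks : List Int) (chunk_size : Int) (chunk_num : Int) (padding_idx : Int) (check : Bool) : List (List Int) × List (List Int) :=
  -- the 'if check: assert len(text_ids)==len(attn_marks)' raises outside Pre_; inside Pre_ it passes
  let total_token_num : Int := chunk_num * chunk_size
  let text_ids' := text_ids ++ List.replicate (total_token_num - (text_ids.length : Int)).toNat padding_idx
  let attn_marks' := attn_marks ++ List.replicate (total_token_num - (attn_marks.length : Int)).toNat 0
  (PySem.List.pyRange 0 chunk_num 1).foldl
    (fun (acc : List (List Int) × List (List Int)) i =>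
      let start_idx := i * chunk_size
      let end_idx := (i + 1) * chunk_size
      (acc.1 ++ [PySem.List.slice text_ids' (some start_idx) (some end_idx)],
       acc.2 ++ [PySem.List.slice attn_marks' (some start_idx) (some end_idx)]))
    ([], [])

-- ===== PORT B =====
-- B's helper 'chunked': peel head = rest[:cs] off a shrinking remainder rest, pad it locally;
-- the loop variable of range(chunk_num) is unused.
def pvChunkedB (xs : List Int) (chunk_size : Int) (chunk_num : Int) (filler : Int) : List (List Int) :=
  ((PySem.List.pyRange 0 chunk_num 1).foldl
    (fun (acc : List (List Int) × List Int) _ =>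
      let head := PySem.List.slice acc.2 none (some chunk_size)
      let rest := PySem.List.slice acc.2 (some chunk_size) none
      (acc.1 ++ [head ++ List.replicate (chunk_size - (head.length : Int)).toNat filler], rest))
    ([], xs)).1

def token_ids_chunking_alt (text_ids : List Int) (attn_marks : List Int) (chunk_size : Int) (chunk_num : Int) (padding_idx : Int) (check : Bool) : List (List Int) × List (List Int) :=
  (pvChunkedB text_ids chunk_size chunk_num padding_idx,
   pvChunkedB attn_marks chunk_size chunk_num 0)

-- ===== PRECONDITION & SPEC =====
-- Pre_ excludes exactly the inputs where A raises: check=True with lists of different lengths (AssertionError).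
def Pre_token_ids_chunking (text_ids : List Int) (attn_marks : List Int) (chunk_size : Int) (chunk_num : Int) (padding_idx : Int) (check : Bool) : Prop :=
  check = true → text_ids.length = attn_marks.length
instance (text_ids : List Int) (attn_marks : List Int) (chunk_size : Int) (chunk_num : Int) (padding_idx : Int) (check : Bool) : Decidable (Pre_token_ids_chunking text_ids attn_marks chunk_size chunk_num padding_idx check) := by unfold Pre_token_ids_chunking; infer_instance
def pvWitness_token_ids_chunking : List Int × List Int × Int × Int × Int × Bool := ([1, 2, 3], [1, 1, 0], 2, 2, 0, true)

def Spec_token_ids_chunking (text_ids : List Int) (attn_marks : List Int) (chunk_size : Int) (chunk_num : Int) (padding_idx : Int) (check : Bool) (out : List (List Int) × List (List Int)) : Prop := out = token_ids_chunking_alt text_ids attn_marks chunk_size chunk_num padding_idx check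
instance (text_ids : List Int) (attn_marks : List Int) (chunk_size : Int) (chunk_num : Int) (padding_idx : Int) (check : Bool) (out : List (List Int) × List (List Int)) : Decidable (Spec_token_ids_chunking text_ids attn_marks chunk_size chunk_num padding_idx check out) := by unfold Spec_token_ids_chunking; infer_instance

-- ===== CLAIM (what is proved, stated in full; the proofs are below) =====
def Claim_equal_token_ids_chunking : Prop := ∀ (text_ids : List Int) (attn_marks : List Int) (chunk_size : Int) (chunk_num : Int) (padding_idx : Int) (check : Bool), Dom_token_ids_chunking text_ids attn_marks chunk_size chunk_num padding_idx check → Pre_token_ids_chunking text_ids attn_marks chunk_size chunk_num padding_idx check → Spec_token_ids_chunking text_ids attn_marks chunk_size chunk_num padding_idx check (token_ids_chunking text_ids attn_marks chunk_size chunk_num padding_idx check)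

-- ===== LEMMAS AND PROOFS =====

-- A's chunk i of list xs (with filler p): slice of the globally padded list.
def pvAchunk (xs : List Int) (cs cn p i : Int) : List Int :=
  PySem.List.slice (xs ++ List.replicate (cn * cs - (xs.length : Int)).toNat p)
    (some (i * cs)) (some ((i + 1) * cs))

-- the remainder held by B's loop after k steps
def pvRestB (xs : List Int) (cs : Int) (k : Nat) : List Int :=
  if 0 < cs then xs.drop (k * cs.toNat)
  else if k = 0 then xs else PySem.List.slice xs (some cs) none

lemma clampIdx_of_neg (n : Nat) (k : Int) (hk : k < 0) :
    PySem.List.clampIdx n k = ((n : Int) + k).toNat := by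
  simp only [PySem.List.clampIdx, if_pos hk]; split <;> omega

lemma length_restB_neg (xs : List Int) (cs : Int) (m : Nat) (hcs : cs < 0) (hm : 0 < m) :
    ((pvRestB xs cs m).length : Int) + cs ≤ 0 := by
  have h : pvRestB xs cs m = PySem.List.slice xs (some cs) none := by
    have hne : m ≠ 0 := by omega
    simp only [pvRestB, if_neg (not_lt.mpr (le_of_lt hcs)), if_neg hne]
  rw [h, PySem.List.slice_some_none, clampIdx_of_neg _ _ hcs]
  simp only [List.length_drop]
  omega

-- slicing the globally padded list equals slicing the original list and padding the slice (cs > 0 case workhorse)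
lemma chunk_pad_eq (xs : List Int) (cs cn i p : Int) (hi0 : 0 ≤ i) (hic : i < cn) :
    pvAchunk xs cs cn p i
    = PySem.List.slice xs (some (i * cs)) (some ((i + 1) * cs))
      ++ List.replicate
          (cs - ((PySem.List.slice xs (some (i * cs)) (some ((i + 1) * cs))).length : Int)).toNat p := by
  unfold pvAchunk
  rcases le_or_gt cs 0 with hcs | hcs
  · have h1 : (cn * cs - (xs.length : Int)).toNat = 0 := by
      have : cn * cs ≤ 0 := mul_nonpos_of_nonneg_of_nonpos (by omega) hcs
      omega
    have h2 : (cs - ((PySem.List.slice xs (some (i * cs)) (some ((i + 1) * cs))).length : Int)).toNat = 0 := by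
      omega
    simp [h1, h2]
  · have hs0 : 0 ≤ i * cs := mul_nonneg hi0 (le_of_lt hcs)
    have he0 : 0 ≤ (i + 1) * cs := mul_nonneg (by omega) (le_of_lt hcs)
    rw [PySem.List.slice_toNat _ hs0 he0, PySem.List.slice_toNat _ hs0 he0]
    set L := xs.length with hL
    set a := (i * cs).toNat with ha
    set k := (cn * cs - (L : Int)).toNat with hk
    have hac : ((i + 1) * cs).toNat = a + cs.toNat := by
      have : (i + 1) * cs = i * cs + cs := by ring
      omega
    rw [hac]
    have hlen : a + cs.toNat ≤ L + k := by
      have h1 : (i + 1) * cs ≤ cn * cs := by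
        apply mul_le_mul_of_nonneg_right _ (le_of_lt hcs); omega
      omega
    rw [List.drop_append, List.drop_replicate,
        List.take_append, List.take_replicate]
    have h1 : a + cs.toNat - a = cs.toNat := by omega
    rw [h1]
    congr 1
    simp only [List.length_take, List.length_drop]
    congr 1
    omega

-- per-step fact 1: the chunk B peels off the remainder at step m is A's chunk m
lemma chunkB_eq_Achunk (xs : List Int) (cs cn p : Int) (m : Nat) (hm : (m : Int) < cn) :
    PySem.List.slice (pvRestB xs cs m) none (some cs)
      ++ List.replicate
          (cs - ((PySem.List.slice (pvRestB xs cs m) none (some cs)).length : Int)).toNat p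
    = pvAchunk xs cs cn p (m : Int) := by
  rcases lt_or_ge 0 cs with hcs | hcs
  · -- cs > 0
    rw [chunk_pad_eq xs cs cn (m : Int) p (by positivity) hm]
    have hcs' : ((cs.toNat : Int)) = cs := Int.toNat_of_nonneg (le_of_lt hcs)
    have hslice : PySem.List.slice xs (some ((m : Int) * cs)) (some (((m : Int) + 1) * cs))
        = PySem.List.slice (pvRestB xs cs m) none (some cs) := by
      rw [PySem.List.slice_toNat _ (by positivity) (by positivity),
          PySem.List.slice_to _ (le_of_lt hcs)]
      simp only [pvRestB, if_pos hcs]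
      have h2 : ((m : Int) * cs).toNat = m * cs.toNat := by
        have hh : (m : Int) * cs = ((m * cs.toNat : Nat) : Int) := by
          conv_lhs => rw [← hcs']
          push_cast; ring
        rw [hh, Int.toNat_natCast]
      have h1 : (((m : Int) + 1) * cs).toNat = m * cs.toNat + cs.toNat := by
        have hh : ((m : Int) + 1) * cs = (((m + 1) * cs.toNat : Nat) : Int) := by
          conv_lhs => rw [← hcs']
          push_cast; ring
        rw [hh, Int.toNat_natCast]; ring
      rw [h1, h2]
      have h3 : m * cs.toNat + cs.toNat - m * cs.toNat = cs.toNat := by omega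
      rw [h3]
    rw [hslice]
  · -- cs ≤ 0: no padding on either side
    have hpadnone : (cs - ((PySem.List.slice (pvRestB xs cs m) none (some cs)).length : Int)).toNat = 0 := by
      omega
    rw [hpadnone]
    have hpadA : (cn * cs - (xs.length : Int)).toNat = 0 := by
      have : cn * cs ≤ 0 := mul_nonpos_of_nonneg_of_nonpos (by omega) hcs
      omega
    unfold pvAchunk
    rw [hpadA]
    simp only [List.replicate_zero, List.append_nil]
    rcases Nat.eq_zero_or_pos m with hm0 | hm0
    · subst hm0
      simp [pvRestB]
    · -- m ≥ 1: both sides empty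
      rcases eq_or_lt_of_le hcs with hcs0 | hcsneg
      · -- cs = 0
        subst hcs0
        simp [pvRestB, PySem.List.slice_to]
      · -- cs < 0
        have hLrest := length_restB_neg xs cs m hcsneg hm0
        have hB : PySem.List.slice (pvRestB xs cs m) none (some cs) = [] := by
          have hc : cs = -(((-cs).toNat : Int)) := by omega
          generalize hr : pvRestB xs cs m = r at hLrest ⊢
          rw [hc, PySem.List.slice_to_neg_natCast _ _ (by omega)]
          apply List.eq_nil_of_length_eq_zero
          simp only [List.length_take]
          omega
        have hA : PySem.List.slice xs (some ((m : Int) * cs)) (some (((m : Int) + 1) * cs)) = [] := by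
          apply List.eq_nil_of_length_eq_zero
          rw [PySem.List.length_slice]
          have hms : (m : Int) * cs < 0 :=
            mul_neg_of_pos_of_neg (by exact_mod_cast hm0) hcsneg
          have hme : ((m : Int) + 1) * cs < 0 :=
            mul_neg_of_pos_of_neg (by positivity) hcsneg
          rw [clampIdx_of_neg _ _ hms, clampIdx_of_neg _ _ hme]
          have : ((m : Int) + 1) * cs ≤ (m : Int) * cs := by nlinarith
          omega
        rw [hA, hB]

-- per-step fact 2: dropping the peeled chunk advances the remainder by one step
lemma restB_step (xs : List Int) (cs : Int) (m : Nat) :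
    PySem.List.slice (pvRestB xs cs m) (some cs) none = pvRestB xs cs (m + 1) := by
  rcases lt_or_ge 0 cs with hcs | hcs
  · simp only [pvRestB, if_pos hcs]
    rw [PySem.List.slice_from _ (le_of_lt hcs), List.drop_drop]
    congr 1
    ring
  · rcases Nat.eq_zero_or_pos m with hm0 | hm0
    · subst hm0
      simp [pvRestB, if_neg (not_lt.mpr hcs)]
    · have hrest : pvRestB xs cs m = pvRestB xs cs (m + 1) := by
        have hne : m ≠ 0 := by omega
        simp only [pvRestB, if_neg (not_lt.mpr hcs), if_neg hne, if_neg (Nat.succ_ne_zero m)]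
      rw [← hrest]
      rcases eq_or_lt_of_le hcs with hcs0 | hcsneg
      · subst hcs0
        simp [PySem.List.slice_from]
      · have hLrest := length_restB_neg xs cs m hcsneg hm0
        have hc : cs = -(((-cs).toNat : Int)) := by omega
        generalize hr : pvRestB xs cs m = r at hLrest ⊢
        rw [hc, PySem.List.slice_from_neg_natCast _ _ (by omega)]
        have h0 : r.length - (-cs).toNat = 0 := by omega
        rw [h0, List.drop_zero]

-- A's interleaved loop is a pair of maps over range(chunk_num).
lemma foldl_pair_map {α β : Type} (f g : α → β) (l : List α) (a b : List β) :
    l.foldl (fun acc i => (acc.1 ++ [f i], acc.2 ++ [g i])) (a, b)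
    = (a ++ l.map f, b ++ l.map g) := by
  induction l generalizing a b with
  | nil => simp
  | cons x t ih => simp [List.foldl_cons, ih, List.append_assoc]

-- invariant of B's consumption loop: after k ≤ cn steps it has produced A's first k chunks
-- and holds the remainder pvRestB.
lemma chunkedB_invariant (xs : List Int) (cs cn p : Int) (k : Nat) (hk : (k : Int) ≤ cn) :
    (PySem.List.pyRange 0 (k : Int) 1).foldl
      (fun (acc : List (List Int) × List Int) _ =>
        let head := PySem.List.slice acc.2 none (some cs)
        let rest := PySem.List.slice acc.2 (some cs) none
        (acc.1 ++ [head ++ List.replicate (cs - (head.length : Int)).toNat p], rest))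
      ([], xs)
    = ((PySem.List.pyRange 0 (k : Int) 1).map (pvAchunk xs cs cn p), pvRestB xs cs k) := by
  induction k with
  | zero => simp [PySem.List.pyRange_one_eq_nil, pvRestB]
  | succ m ih =>
    have hm : (m : Int) ≤ cn := by push_cast at hk ⊢; omega
    have hstep : PySem.List.pyRange 0 ((m : Int) + 1) 1
        = PySem.List.pyRange 0 (m : Int) 1 ++ [(m : Int)] := by
      exact PySem.List.pyRange_one_succ_right (by positivity)
    push_cast
    rw [hstep, List.foldl_append, List.map_append, ih hm]
    simp only [List.foldl_cons, List.foldl_nil, List.map_cons, List.map_nil, Prod.mk.injEq]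
    have hmlt : (m : Int) < cn := by push_cast at hk; omega
    exact ⟨by rw [chunkB_eq_Achunk xs cs cn p m hmlt], restB_step xs cs m⟩

-- B's helper produces exactly A's chunk list.
lemma chunkedB_eq_map (xs : List Int) (cs cn p : Int) :
    pvChunkedB xs cs cn p = (PySem.List.pyRange 0 cn 1).map (pvAchunk xs cs cn p) := by
  unfold pvChunkedB
  rcases le_or_gt cn 0 with hcn | hcn
  · rw [PySem.List.pyRange_one_eq_nil hcn]
    simp
  · have hcn' : ((cn.toNat : Int)) = cn := Int.toNat_of_nonneg (le_of_lt hcn)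
    have h := chunkedB_invariant xs cs cn p cn.toNat (by omega)
    rw [hcn'] at h
    rw [h]

theorem token_ids_chunking_eq (text_ids attn_marks : List Int) (chunk_size chunk_num padding_idx : Int) (check : Bool) :
    token_ids_chunking text_ids attn_marks chunk_size chunk_num padding_idx check
    = token_ids_chunking_alt text_ids attn_marks chunk_size chunk_num padding_idx check := by
  unfold token_ids_chunking token_ids_chunking_alt
  rw [chunkedB_eq_map text_ids chunk_size chunk_num padding_idx,
      chunkedB_eq_map attn_marks chunk_size chunk_num 0]
  rw [foldl_pair_map]
  simp [pvAchunk]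

-- ===== VERDICT (by name: the statement is the Claim_ definition above) =====
theorem token_ids_chunking_spec : Claim_equal_token_ids_chunking := by
  intro text_ids attn_marks chunk_size chunk_num padding_idx check _ _
  exact token_ids_chunking_eq text_ids attn_marks chunk_size chunk_num padding_idx check
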